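-- pv_equiv track=rewrite | github.com/csmartin6/project-euler-python | project_euler/problem_068.py | build_ngon
-- ===== SOURCE A (Python) =====
-- import itertools
--
-- def check_ngon(kgon):
--     sums = [sum(line) for line in kgon if all(line)]
--     if len(sums) == 0:
--         return True
--     return min(sums) == max(sums)
--
-- def build_ngon(inner, outer):
--
--     for perm in itertools.permutations(inner):
--         ngon = [[o, None, None] for o in outer]
--
--         for i, p in enumerate(perm):
--             ngon[i][1] = p
--             ngon[i-1][2] = p
--
--         if check_ngon(ngon):
--             return ngon
--
--     return None
-- ===== SOURCE B (Python) =====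
-- def build_ngon(inner, outer):
--     # Backtracking over positions of `inner` in lex (itertools) order, pruning a
--     # partial placement as soon as a completed all-truthy line breaks sum equality.
--     n = len(inner)
--     m = len(outer)
--
--     def line_sum(o, b, c):
--         # sum of a completed line, or None if the line has a falsy entry
--         return o + b + c if o and b and c else None
--
--     def new_sums(pref, sums):
--         # extend the stack of equal line sums with the lines completed by
--         # placing pref[-1]; None means the equality is already broken
--         k = len(pref) - 1
--         lines = []
--         if 1 <= k:
--             lines.append((outer[k - 1], pref[k - 1], pref[k]))
--         if k == n - 1 and n == m:
--             lines.append((outer[m - 1], pref[m - 1], pref[0]))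
--         for line in lines:
--             s = line_sum(*line)
--             if s is None:
--                 continue
--             if sums and sums[0] != s:
--                 return None
--             sums = sums + [s]
--         return sums
--
--     def finish(perm):
--         ngon = []
--         for i in range(m):
--             b = perm[i] if i < n else None
--             if i <= n - 2:
--                 c = perm[i + 1]
--             elif i == m - 1 and 1 <= n:
--                 c = perm[0]
--             else:
--                 c = None
--             ngon.append([outer[i], b, c])
--         return ngon
--
--     def dfs(pref, rem, sums):
--         if not rem:
--             return finish(pref)
--         for j in range(len(rem)):
--             ns = new_sums(pref + [rem[j]], sums)
--             if ns is None:
--                 continue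
--             r = dfs(pref + [rem[j]], rem[:j] + rem[j + 1:], ns)
--             if r is not None:
--                 return r
--         return None
--
--     return dfs([], inner, [])
-- ===== Notes on version B (the rewrite author's own statement) =====
-- stated objective: alternative
-- what changed: A materialises every permutation of the inner values (itertools order) and re-checks the whole n-gon for each; B backtracks over positions in the same lexicographic order, checking each line the moment it is completed and pruning the entire subtree as soon as one all-truthy line sum breaks equality (intended to explore far fewer nodes; a timing run saw A time out at n=16 where B returned, but could not certify a ratio).
import Mathlib
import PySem

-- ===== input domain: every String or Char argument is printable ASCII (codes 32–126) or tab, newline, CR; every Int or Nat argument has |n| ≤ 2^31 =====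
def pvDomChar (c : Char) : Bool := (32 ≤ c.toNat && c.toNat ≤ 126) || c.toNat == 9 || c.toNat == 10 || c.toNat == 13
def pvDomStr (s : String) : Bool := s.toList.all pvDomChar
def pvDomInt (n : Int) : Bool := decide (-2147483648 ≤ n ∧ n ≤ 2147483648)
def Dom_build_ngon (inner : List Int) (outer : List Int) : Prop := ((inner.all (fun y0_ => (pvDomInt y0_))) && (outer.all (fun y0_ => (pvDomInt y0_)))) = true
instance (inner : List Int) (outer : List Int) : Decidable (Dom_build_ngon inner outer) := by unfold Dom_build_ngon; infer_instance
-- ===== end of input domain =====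

-- B replaces A's scan of all n! permutations by a lexicographic backtracking search that
-- prunes a partial placement as soon as a completed all-truthy line breaks line-sum equality.

-- ===== PORT A =====
-- sums = [sum(line) for line in kgon if all(line)]  (a falsy entry is None or 0;
-- `o.getD 0` in the sum is exact: sum is only taken on lines `all` kept, where every entry is some _)
def pvSumsOf (kgon : List (List (Option Int))) : List Int :=
  (kgon.filter (fun line => line.all (fun o => o.getD 0 != 0))).map
    (fun line => (line.map (fun o => o.getD 0)).sum)

def pvCheckNgon (kgon : List (List (Option Int))) : Bool :=
  let sums := pvSumsOf kgon
  if sums.length = 0 then true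
  else PySem.List.min? sums (fun x => x) == PySem.List.max? sums (fun x => x)

-- one iteration of `for i, p in enumerate(perm)`, split in its two statements:
-- pvPlace1 is `ngon[i][1] = p`, pvPlace2 is `ngon[i-1][2] = p`
def pvPlace1 (ngon : List (List (Option Int))) (iv : Int × Int) : List (List (Option Int)) :=
  PySem.List.pySetD ngon iv.1
    (PySem.List.pySetD (PySem.List.pyGetD ngon iv.1 []) 1 (some iv.2))

def pvPlace2 (ngon1 : List (List (Option Int))) (iv : Int × Int) : List (List (Option Int)) :=
  PySem.List.pySetD ngon1 (iv.1 - 1)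
    (PySem.List.pySetD (PySem.List.pyGetD ngon1 (iv.1 - 1) []) 2 (some iv.2))

def pvPlace (ngon : List (List (Option Int))) (iv : Int × Int) : List (List (Option Int)) :=
  pvPlace2 (pvPlace1 ngon iv) iv

def pvNgonOf (outer perm : List Int) : List (List (Option Int)) :=
  (PySem.List.enumerate perm 0).foldl pvPlace (outer.map (fun o => [some o, none, none]))

-- `for perm in itertools.permutations(inner): … if check_ngon(ngon): return ngon`
def pvFirstA (outer : List Int) : List (List Int) → Option (List (List (Option Int)))
  | [] => none
  | p :: ps => if pvCheckNgon (pvNgonOf outer p) then some (pvNgonOf outer p) else pvFirstA outer ps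

def build_ngon (inner : List Int) (outer : List Int) : Option (List (List (Option Int))) :=
  pvFirstA outer (PySem.List.permutations inner inner.length)

-- ===== PORT B =====
-- line_sum(o, b, c): the sum of a completed line, none if the line has a falsy entry
def pvLineSum (o b c : Int) : Option Int :=
  if o ≠ 0 ∧ b ≠ 0 ∧ c ≠ 0 then some (o + b + c) else none

-- new_sums(pref, sums): extend the stack of equal line sums with the lines completed
-- by placing pref[-1]; none = equality broken (the fold's none state is the early `return None`)
-- the lines completed by placing pref[-1] (k = len(pref) - 1 is inlined)
def pvLines (n m : Nat) (outer pref : List Int) : List (Int × Int × Int) :=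
  (if 1 ≤ (pref.length : Int) - 1 then
    [(PySem.List.pyGetD outer ((pref.length : Int) - 1 - 1) 0,
      PySem.List.pyGetD pref ((pref.length : Int) - 1 - 1) 0,
      PySem.List.pyGetD pref ((pref.length : Int) - 1) 0)]
   else [])
  ++ (if (pref.length : Int) - 1 = (n : Int) - 1 ∧ n = m then
    [(PySem.List.pyGetD outer ((m : Int) - 1) 0, PySem.List.pyGetD pref ((m : Int) - 1) 0,
      PySem.List.pyGetD pref 0 0)]
   else [])

def pvNewSums (n m : Nat) (outer pref sums : List Int) : Option (List Int) :=
  (pvLines n m outer pref).foldl (fun acc l =>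
    match acc with
    | none => none
    | some su =>
      match pvLineSum l.1 l.2.1 l.2.2 with
      | none => some su
      | some s => if su ≠ [] ∧ su.headD 0 ≠ s then none else some (su ++ [s])) (some sums)

-- finish(perm): build the n-gon rows from a full placement
def pvFinish (n m : Nat) (outer perm : List Int) : List (List (Option Int)) :=
  (PySem.List.pyRange 0 (m : Int) 1).map (fun i =>
    [some (PySem.List.pyGetD outer i 0),
     if i < (n : Int) then some (PySem.List.pyGetD perm i 0) else none,
     if i ≤ (n : Int) - 2 then some (PySem.List.pyGetD perm (i + 1) 0)
     else if i = (m : Int) - 1 ∧ 1 ≤ (n : Int) then some (PySem.List.pyGetD perm 0 0) else none])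

mutual
-- dfs(pref, rem, sums)
def pvDfs (n m : Nat) (outer : List Int) (fuel : Nat) (pref rem sums : List Int) :
    Option (List (List (Option Int))) :=
  if rem.isEmpty then some (pvFinish n m outer pref)
  else match fuel with
    | 0 => none
    | fuel' + 1 => pvDfsLoop n m outer fuel' pref rem sums 0
termination_by (fuel, 0)

-- the `for j in range(len(rem))` loop of dfs, from index j on
def pvDfsLoop (n m : Nat) (outer : List Int) (fuel : Nat) (pref rem sums : List Int) (j : Nat) :
    Option (List (List (Option Int))) :=
  if h : j < rem.length then
    match pvNewSums n m outer (pref ++ [rem[j]]) sums with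
    | none => pvDfsLoop n m outer fuel pref rem sums (j + 1)
    | some ns =>
      match pvDfs n m outer fuel (pref ++ [rem[j]])
          (PySem.List.slice rem none (some (j : Int)) ++
           PySem.List.slice rem (some ((j : Int) + 1)) none) ns with
      | some r => some r
      | none => pvDfsLoop n m outer fuel pref rem sums (j + 1)
  else none
termination_by (fuel, rem.length + 1 - j)
decreasing_by
  all_goals (simp_wf; omega)
end

def build_ngon_alt (inner : List Int) (outer : List Int) : Option (List (List (Option Int))) :=
  pvDfs inner.length outer.length outer inner.length [] inner []

-- ===== PRECONDITION & SPEC =====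
-- A raises IndexError (ngon[i][1] with i past the outer list) whenever inner is longer than outer.
def Pre_build_ngon (inner : List Int) (outer : List Int) : Prop := inner.length ≤ outer.length
instance (inner : List Int) (outer : List Int) : Decidable (Pre_build_ngon inner outer) := by
  unfold Pre_build_ngon; infer_instance

def pvWitness_build_ngon : List Int × List Int := ([1, 2, 3], [4, 5, 6])

def Spec_build_ngon (inner : List Int) (outer : List Int) (out : Option (List (List (Option Int)))) : Prop := out = build_ngon_alt inner outer
instance (inner : List Int) (outer : List Int) (out : Option (List (List (Option Int)))) : Decidable (Spec_build_ngon inner outer out) := by unfold Spec_build_ngon; infer_instance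

-- ===== CLAIM (what is proved, stated in full; the proofs are below) =====
def Claim_equal_build_ngon : Prop := ∀ (inner : List Int) (outer : List Int), Dom_build_ngon inner outer → Pre_build_ngon inner outer → Spec_build_ngon inner outer (build_ngon inner outer)

-- ===== LEMMAS AND PROOFS =====

-- "all collected line sums are equal" — the invariant the backtracking keeps
def pvAE (S : List Int) : Prop := ∀ x ∈ S, ∀ y ∈ S, x = y

-- the (0 or 1) qualifying sums of one line
def pvQual (o b c : Int) : List Int := if o ≠ 0 ∧ b ≠ 0 ∧ c ≠ 0 then [o + b + c] else []

-- the qualifying sums of the lines completed by placing the LAST element of p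
def pvStepQ (n m : Nat) (outer p : List Int) : List Int :=
  (if 2 ≤ p.length then
    pvQual (outer.getD (p.length - 2) 0) (p.getD (p.length - 2) 0) (p.getD (p.length - 1) 0)
   else [])
  ++ (if p.length = n ∧ n = m then
    pvQual (outer.getD (m - 1) 0) (p.getD (m - 1) 0) (p.getD 0 0)
   else [])

-- all qualifying sums collected while placing p element by element
def pvQsums (n m : Nat) (outer p : List Int) : List Int :=
  (List.range p.length).flatMap (fun k => pvStepQ n m outer (p.take (k + 1)))

theorem pvQsums_append (n m : Nat) (outer pref : List Int) (v : Int) :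
    pvQsums n m outer (pref ++ [v]) = pvQsums n m outer pref ++ pvStepQ n m outer (pref ++ [v]) := by
  unfold pvQsums
  simp only [List.length_append, List.length_cons, List.length_nil, Nat.zero_add]
  rw [List.range_succ, List.flatMap_append]
  congr 1
  · refine List.flatMap_congr (fun k hk => ?_)
    rw [List.mem_range] at hk
    rw [List.take_append_of_le_length (by omega)]
  · simp [List.take_of_length_le]

theorem pvAE_append_left {a b : List Int} (h : pvAE (a ++ b)) : pvAE a := by
  intro x hx y hy
  exact h x (List.mem_append_left _ hx) y (List.mem_append_left _ hy)

theorem pvQsums_extend_not (n m : Nat) (outer pref q : List Int)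
    (h : ¬ pvAE (pvQsums n m outer pref)) : ¬ pvAE (pvQsums n m outer (pref ++ q)) := by
  induction q generalizing pref with
  | nil => simpa using h
  | cons x q ih =>
    rw [show pref ++ x :: q = (pref ++ [x]) ++ q by simp]
    refine ih (pref ++ [x]) (fun hAE => h ?_)
    rw [pvQsums_append] at hAE
    exact pvAE_append_left hAE

-- one `sums and sums[0] != s` check-and-push, as a fold step
def pvPush (acc : Option (List Int)) (s : Int) : Option (List Int) :=
  match acc with
  | none => none
  | some su => if su ≠ [] ∧ su.headD 0 ≠ s then none else some (su ++ [s])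

theorem pvPush_none (L : List Int) : L.foldl pvPush none = none := by
  induction L with
  | nil => rfl
  | cons s L ih => simpa [pvPush] using ih

theorem pvFold_lines (lines : List (Int × Int × Int)) (acc : Option (List Int)) :
    lines.foldl (fun acc l =>
      match acc with
      | none => none
      | some su =>
        match pvLineSum l.1 l.2.1 l.2.2 with
        | none => some su
        | some s => if su ≠ [] ∧ su.headD 0 ≠ s then none else some (su ++ [s])) acc
    = (lines.flatMap (fun l => pvQual l.1 l.2.1 l.2.2)).foldl pvPush acc := by
  induction lines generalizing acc with
  | nil => rfl
  | cons l lines ih =>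
    rw [List.foldl_cons, List.flatMap_cons, List.foldl_append, ih]
    congr 1
    cases acc with
    | none => simp [pvPush_none]
    | some su =>
      unfold pvQual pvLineSum
      by_cases hc : l.1 ≠ 0 ∧ l.2.1 ≠ 0 ∧ l.2.2 ≠ 0
      · simp [hc, pvPush]
      · simp [hc]

theorem pvLines_flatMap (n m : Nat) (outer p : List Int) (h1 : 1 ≤ p.length) :
    (pvLines n m outer p).flatMap (fun l => pvQual l.1 l.2.1 l.2.2) = pvStepQ n m outer p := by
  have e2 : (p.length : Int) - 1 = ((p.length - 1 : Nat) : Int) := by omega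
  unfold pvLines pvStepQ
  by_cases hA : 2 ≤ p.length
  · have e1 : ((p.length : Int) - 1) - 1 = ((p.length - 2 : Nat) : Int) := by omega
    by_cases hB : p.length = n ∧ n = m
    · obtain ⟨hBn, hBm⟩ := hB
      have e3 : (m : Int) - 1 = ((m - 1 : Nat) : Int) := by omega
      rw [if_pos (by omega : (1:Int) ≤ (p.length : Int) - 1),
          if_pos (by exact ⟨by omega, hBm⟩ : (p.length : Int) - 1 = (n : Int) - 1 ∧ n = m),
          if_pos hA, if_pos ⟨hBn, hBm⟩, e1, e2, e3]
      simp [PySem.List.pyGetD_natCast, PySem.List.pyGetD_zero]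
    · rw [if_pos (by omega : (1:Int) ≤ (p.length : Int) - 1),
          if_neg (by rintro ⟨h1', h2'⟩; exact hB ⟨by omega, h2'⟩),
          if_pos hA, if_neg hB, e1, e2]
      simp [PySem.List.pyGetD_natCast]
  · by_cases hB : p.length = n ∧ n = m
    · obtain ⟨hBn, hBm⟩ := hB
      have e3 : (m : Int) - 1 = ((m - 1 : Nat) : Int) := by omega
      rw [if_neg (by omega : ¬ (1:Int) ≤ (p.length : Int) - 1),
          if_pos (by exact ⟨by omega, hBm⟩ : (p.length : Int) - 1 = (n : Int) - 1 ∧ n = m),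
          if_neg hA, if_pos ⟨hBn, hBm⟩, e3]
      simp [PySem.List.pyGetD_natCast, PySem.List.pyGetD_zero]
    · rw [if_neg (by omega : ¬ (1:Int) ≤ (p.length : Int) - 1),
          if_neg (by rintro ⟨h1', h2'⟩; exact hB ⟨by omega, h2'⟩),
          if_neg hA, if_neg hB]
      rfl

theorem pvNewSums_foldl (n m : Nat) (outer p sums : List Int) (h1 : 1 ≤ p.length) :
    pvNewSums n m outer p sums = (pvStepQ n m outer p).foldl pvPush (some sums) := by
  rw [pvNewSums, pvFold_lines, pvLines_flatMap n m outer p h1]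

theorem pvPush_spec (L : List Int) : ∀ (sums : List Int), pvAE sums →
    (pvAE (sums ++ L) → L.foldl pvPush (some sums) = some (sums ++ L)) ∧
    (¬ pvAE (sums ++ L) → L.foldl pvPush (some sums) = none) := by
  induction L with
  | nil =>
    intro sums hAE
    refine ⟨fun _ => by simp, fun h => absurd (by simpa using hAE) h⟩
  | cons s L ih =>
    intro sums hAE
    by_cases hc : sums ≠ [] ∧ sums.head?.getD 0 ≠ s
    · have hpush : pvPush (some sums) s = none := by simp [pvPush, hc]
      have hnot : ¬ pvAE (sums ++ s :: L) := by
        intro hA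
        obtain ⟨hne, hhd⟩ := hc
        have hmem : sums.head?.getD 0 ∈ sums := by
          cases sums with
          | nil => exact absurd rfl hne
          | cons a t => simp
        exact hhd (hA _ (List.mem_append_left _ hmem) s (by simp))
      refine ⟨fun h => absurd h hnot, fun _ => ?_⟩
      rw [List.foldl_cons, hpush, pvPush_none]
    · have hpush : pvPush (some sums) s = some (sums ++ [s]) := by simp [pvPush, hc]
      have hall : ∀ x ∈ sums ++ [s], x = s := by
        intro x hx
        rcases List.mem_append.1 hx with hx | hx
        · cases sums with
          | nil => cases hx
          | cons a t =>
            have ha : a = s := by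
              rcases not_and_or.1 hc with h0 | h0
              · exact absurd (by simp) h0
              · simpa using not_ne_iff.1 h0
            exact (hAE x hx a (by simp)).trans ha
        · simpa using hx
      have hAE' : pvAE (sums ++ [s]) := fun x hx y hy => (hall x hx).trans (hall y hy).symm
      have hih := ih (sums ++ [s]) hAE'
      rw [List.foldl_cons, hpush]
      constructor
      · intro h
        rw [hih.1 (by rwa [← List.append_cons])]
        simp
      · intro h
        exact hih.2 (by rwa [List.append_cons] at h)

theorem pvNewSums_some (n m : Nat) (outer p sums : List Int)
    (h1 : 1 ≤ p.length) (hAE : pvAE sums) (h : pvAE (sums ++ pvStepQ n m outer p)) :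
    pvNewSums n m outer p sums = some (sums ++ pvStepQ n m outer p) := by
  rw [pvNewSums_foldl n m outer p sums h1]
  exact (pvPush_spec _ _ hAE).1 h

theorem pvNewSums_none (n m : Nat) (outer p sums : List Int)
    (h1 : 1 ≤ p.length) (hAE : pvAE sums) (h : ¬ pvAE (sums ++ pvStepQ n m outer p)) :
    pvNewSums n m outer p sums = none := by
  rw [pvNewSums_foldl n m outer p sums h1]
  exact (pvPush_spec _ _ hAE).2 h

-- row j of the n-gon after the first k placements of A's loop
def pvPRow (n m : Nat) (outer p : List Int) (k j : Nat) : List (Option Int) :=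
  [some (outer.getD j 0),
   if j < k then some (p.getD j 0) else none,
   if j + 2 ≤ k then some (p.getD (j + 1) 0)
   else if j = m - 1 ∧ 1 ≤ k then some (p.getD 0 0) else none]

def pvPartial (n m : Nat) (outer p : List Int) (k : Nat) : List (List (Option Int)) :=
  (List.range m).map (pvPRow n m outer p k)

theorem pvSetD_one {α : Type} (a b c v : α) : PySem.List.pySetD [a, b, c] 1 v = [a, v, c] := by
  simp [PySem.List.pySetD, PySem.List.pySet?, PySem.List.pyIdx?]

theorem pvSetD_two {α : Type} (a b c v : α) : PySem.List.pySetD [a, b, c] 2 v = [a, b, v] := by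
  simp [PySem.List.pySetD, PySem.List.pySet?, PySem.List.pyIdx?]

theorem pvSetD_neg_one {α : Type} (xs : List α) (v : α) (h : xs ≠ []) :
    PySem.List.pySetD xs (-1) v = xs.set (xs.length - 1) v := by
  have hlen : 1 ≤ xs.length := List.length_pos_iff.2 h
  simp [PySem.List.pySetD, PySem.List.pySet?, PySem.List.pyIdx?,
    show -(xs.length : Int) ≤ -1 by omega]

theorem pvSet_map_range {α : Type} (f : Nat → α) (m k : Nat) (v : α) (hk : k < m) :
    ((List.range m).map f).set k v = (List.range m).map (fun j => if j = k then v else f j) := by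
  refine List.ext_getElem (by simp) (fun i h1 h2 => ?_)
  simp only [List.length_set, List.length_map, List.length_range] at h1
  rw [List.getElem_set, List.getElem_map, List.getElem_map, List.getElem_range]
  by_cases hik : i = k
  · rw [if_pos (by omega), if_pos hik]
  · rw [if_neg (by omega), if_neg hik]

theorem pvGetD_map_range_int {α : Type} (f : Nat → α) (m j : Nat) (d : α) (hj : j < m) :
    PySem.List.pyGetD ((List.range m).map f) (j : Int) d = f j := by
  rw [PySem.List.pyGetD_natCast, PySem.List.getD_map_range _ m j _ hj]

theorem pvPlace1_eq (n m : Nat) (outer p : List Int) (k : Nat) (v : Int) (hk : k < m) :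
    pvPlace1 (pvPartial n m outer p k) ((k : Int), v) =
      (List.range m).map (fun j =>
        if j = k then
          [some (outer.getD k 0), some v,
           if k + 2 ≤ k then some (p.getD (k + 1) 0)
           else if k = m - 1 ∧ 1 ≤ k then some (p.getD 0 0) else none]
        else pvPRow n m outer p k j) := by
  have hrow : PySem.List.pySetD (pvPRow n m outer p k k) 1 (some v) =
      [some (outer.getD k 0), some v,
       if k + 2 ≤ k then some (p.getD (k + 1) 0)
       else if k = m - 1 ∧ 1 ≤ k then some (p.getD 0 0) else none] := by
    rw [pvPRow]
    exact pvSetD_one _ _ _ _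
  unfold pvPlace1 pvPartial
  rw [pvGetD_map_range_int _ m k _ hk, hrow, PySem.List.pySetD_natCast,
    pvSet_map_range _ m k _ hk]

theorem pvPlace_step (n m : Nat) (outer p : List Int) (k : Nat) (v : Int)
    (hk : k < n) (hnm : n ≤ m) (hv : p.getD k 0 = v) :
    pvPlace (pvPartial n m outer p k) ((k : Int), v) = pvPartial n m outer p (k + 1) := by
  have hm : 1 ≤ m := by omega
  have hkm : k < m := by omega
  rw [pvPlace, pvPlace1_eq n m outer p k v hkm, pvPlace2]
  set A := (List.range m).map (fun j =>
      if j = k then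
        [some (outer.getD k 0), some v,
         if k + 2 ≤ k then some (p.getD (k + 1) 0)
         else if k = m - 1 ∧ 1 ≤ k then some (p.getD 0 0) else none]
      else pvPRow n m outer p k j) with hA
  have hlenA : A.length = m := by rw [hA]; simp
  rcases Nat.eq_zero_or_pos k with hk0 | hk1
  · subst hk0
    rw [show ((0 : Nat) : Int) - 1 = -1 by omega]
    rw [PySem.List.pyGetD_neg_ofNat A 1 [] (by omega) (by omega)]
    rw [pvSetD_neg_one A _ (by intro hh; rw [hh] at hlenA; simp at hlenA; omega)]
    rw [← List.getD_eq_getElem A []]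
    simp only [hlenA]
    have hAget : A.getD (m - 1) [] = (if m - 1 = 0 then
        [some (outer.getD 0 0), some v,
         if 0 + 2 ≤ 0 then some (p.getD (0 + 1) 0)
         else if 0 = m - 1 ∧ 1 ≤ 0 then some (p.getD 0 0) else none]
      else pvPRow n m outer p 0 (m - 1)) := by
      rw [hA]; exact PySem.List.getD_map_range _ m (m - 1) _ (by omega)
    rw [hAget, hA, pvSet_map_range _ m (m - 1) _ (by omega)]
    refine List.map_congr_left (fun j hj => ?_)
    rw [List.mem_range] at hj
    by_cases hm1 : m = 1
    · subst hm1
      have hj0 : j = 0 := by omega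
      subst hj0
      rw [if_pos rfl, if_pos rfl, pvSetD_two, pvPRow,
        if_pos (by omega : (0:Nat) < 0 + 1), if_neg (by omega : ¬ (0:Nat) + 2 ≤ 0 + 1),
        if_pos (by omega : (0:Nat) = 1 - 1 ∧ 1 ≤ 0 + 1), hv]
    · have hm2 : 2 ≤ m := by omega
      by_cases hjm : j = m - 1
      · subst hjm
        rw [if_pos rfl, if_neg (by omega), pvPRow,
          if_neg (by omega : ¬ m - 1 < 0), if_neg (by omega : ¬ m - 1 + 2 ≤ 0),
          if_neg (by omega : ¬ (m - 1 = m - 1 ∧ 1 ≤ 0)), pvSetD_two, pvPRow,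
          if_neg (by omega : ¬ m - 1 < 0 + 1), if_neg (by omega : ¬ m - 1 + 2 ≤ 0 + 1),
          if_pos (by omega : m - 1 = m - 1 ∧ 1 ≤ 0 + 1), hv]
      · rw [if_neg hjm]
        by_cases hj0 : j = 0
        · subst hj0
          rw [if_pos rfl, pvPRow,
            if_pos (by omega : (0:Nat) < 0 + 1), if_neg (by omega : ¬ (0:Nat) + 2 ≤ 0 + 1),
            if_neg (by omega : ¬ ((0:Nat) = m - 1 ∧ 1 ≤ 0 + 1)),
            if_neg (by omega : ¬ (0:Nat) + 2 ≤ 0),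
            if_neg (by omega : ¬ ((0:Nat) = m - 1 ∧ 1 ≤ 0)), hv]
        · rw [if_neg hj0, pvPRow, pvPRow,
            if_neg (by omega : ¬ j < 0), if_neg (by omega : ¬ j < 0 + 1),
            if_neg (by omega : ¬ j + 2 ≤ 0), if_neg (by omega : ¬ j + 2 ≤ 0 + 1),
            if_neg (by omega : ¬ (j = m - 1 ∧ 1 ≤ 0)),
            if_neg (by omega : ¬ (j = m - 1 ∧ 1 ≤ 0 + 1))]
  · rw [show ((k : Nat) : Int) - 1 = ((k - 1 : Nat) : Int) by omega]
    have hAget : PySem.List.pyGetD A ((k - 1 : Nat) : Int) [] = pvPRow n m outer p k (k - 1) := by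
      rw [hA, pvGetD_map_range_int _ m (k - 1) _ (by omega), if_neg (by omega)]
    rw [hAget, PySem.List.pySetD_natCast, pvPRow,
      if_pos (by omega : k - 1 < k), if_neg (by omega : ¬ k - 1 + 2 ≤ k),
      if_neg (by omega : ¬ (k - 1 = m - 1 ∧ 1 ≤ k)), pvSetD_two, hA,
      pvSet_map_range _ m (k - 1) _ (by omega)]
    refine List.map_congr_left (fun j hj => ?_)
    rw [List.mem_range] at hj
    by_cases hjk1 : j = k - 1
    · subst hjk1
      rw [if_pos rfl, pvPRow, if_pos (by omega : k - 1 < k + 1),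
        if_pos (by omega : k - 1 + 2 ≤ k + 1), show k - 1 + 1 = k by omega, hv]
    · rw [if_neg hjk1]
      by_cases hjk : j = k
      · rw [hjk, if_pos rfl, pvPRow, if_pos (by omega : k < k + 1),
          if_neg (by omega : ¬ k + 2 ≤ k), if_neg (by omega : ¬ k + 2 ≤ k + 1), hv]
        simp only [show (k = m - 1 ∧ 1 ≤ k) = (k = m - 1 ∧ 1 ≤ k + 1) from propext (by omega)]
      · rw [if_neg hjk, pvPRow, pvPRow]
        simp only [show (j < k) = (j < k + 1) from propext (by omega),
          show (j + 2 ≤ k) = (j + 2 ≤ k + 1) from propext (by omega),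
          show (j = m - 1 ∧ 1 ≤ k) = (j = m - 1 ∧ 1 ≤ k + 1) from propext (by omega)]

-- the rows of a finished n-gon, with Nat indices
def pvRow (n m : Nat) (outer p : List Int) (j : Nat) : List (Option Int) :=
  [some (outer.getD j 0),
   if j < n then some (p.getD j 0) else none,
   if j + 2 ≤ n then some (p.getD (j + 1) 0)
   else if j = m - 1 ∧ 1 ≤ n then some (p.getD 0 0) else none]

theorem pvFinish_eq (n m : Nat) (outer p : List Int) :
    pvFinish n m outer p = (List.range m).map (pvRow n m outer p) := by
  rw [pvFinish, PySem.List.pyRange_zero_nat, List.map_map]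
  refine List.map_congr_left (fun j hj => ?_)
  rw [List.mem_range] at hj
  have c1 : (((j : Nat) : Int) < (n : Int)) = (j < n) := propext (by omega)
  have c2 : (((j : Nat) : Int) ≤ (n : Int) - 2) = (j + 2 ≤ n) := propext (by omega)
  have c3 : (((j : Nat) : Int) = (m : Int) - 1 ∧ (1 : Int) ≤ (n : Int)) = (j = m - 1 ∧ 1 ≤ n) :=
    propext (by omega)
  have g3 : ((j : Nat) : Int) + 1 = ((j + 1 : Nat) : Int) := by omega
  unfold pvRow
  simp only [Function.comp_apply, c1, c2, c3, g3, PySem.List.pyGetD_natCast,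
    PySem.List.pyGetD_zero]

theorem pvInit (outer p : List Int) (n : Nat) :
    outer.map (fun o => [some o, none, none]) = pvPartial n outer.length outer p 0 := by
  refine List.ext_getElem (by simp [pvPartial]) (fun i h1 h2 => ?_)
  simp only [List.length_map] at h1
  unfold pvPartial pvPRow
  rw [List.getElem_map, List.getElem_map, List.getElem_range,
    if_neg (by omega : ¬ i < 0), if_neg (by omega : ¬ i + 2 ≤ 0),
    if_neg (by omega : ¬ (i = outer.length - 1 ∧ 1 ≤ 0)),
    List.getD_eq_getElem outer 0 h1]

theorem pvFold (n m : Nat) (outer p : List Int) (hnm : n ≤ m) :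
    ∀ (t : List Int) (k : Nat), k + t.length = n → p.drop k = t →
      (PySem.List.enumerate t (k : Int)).foldl pvPlace (pvPartial n m outer p k) =
        pvPartial n m outer p n := by
  intro t
  induction t with
  | nil =>
    intro k hk hdrop
    have hkn : k = n := by simpa using hk
    rw [hkn, PySem.List.enumerate_nil, List.foldl_nil]
  | cons v t ih =>
    intro k hk hdrop
    have hkn : k < n := by simp at hk; omega
    have hpv : p.getD k 0 = v := by
      have h0 : (p.drop k)[0]? = some v := by rw [hdrop]; rfl
      rw [List.getElem?_drop] at h0
      simp only [Nat.add_zero] at h0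
      rw [List.getD_eq_getElem?_getD, h0]
      rfl
    rw [PySem.List.enumerate_cons, List.foldl_cons,
      pvPlace_step n m outer p k v hkn hnm hpv,
      show (k : Int) + 1 = ((k + 1 : Nat) : Int) by omega]
    refine ih (k + 1) (by simp at hk; omega) ?_
    rw [← List.tail_drop, hdrop]
    rfl

theorem pvBuild (outer p : List Int) (h : p.length ≤ outer.length) :
    pvNgonOf outer p = pvFinish p.length outer.length outer p := by
  rw [pvNgonOf, pvInit outer p p.length,
    show (0 : Int) = ((0 : Nat) : Int) by rfl,
    pvFold p.length outer.length outer p h p 0 (by simp) (by simp),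
    pvFinish_eq]
  rfl

-- min(sums) == max(sums) says exactly that all sums are equal
theorem pvMinMax_iff (l : List Int) :
    ((if l.length = 0 then true
      else PySem.List.min? l (fun x => x) == PySem.List.max? l (fun x => x)) = true) ↔ pvAE l := by
  cases l with
  | nil => simp [pvAE]
  | cons a t =>
    rw [if_neg (by simp)]
    rw [beq_iff_eq]
    constructor
    · intro h
      cases hm : PySem.List.min? (a :: t) (fun x => x) with
      | none => exact absurd (PySem.List.min?_eq_none_iff _ _ |>.1 hm) (by simp)
      | some v =>
        rw [hm] at h
        intro x hx y hy
        have h1 := PySem.List.min?_isMin hm x hx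
        have h2 := PySem.List.max?_isMax h.symm x hx
        have h3 := PySem.List.min?_isMin hm y hy
        have h4 := PySem.List.max?_isMax h.symm y hy
        omega
    · intro hAE
      cases hm : PySem.List.min? (a :: t) (fun x => x) with
      | none => exact absurd (PySem.List.min?_eq_none_iff _ _ |>.1 hm) (by simp)
      | some v =>
        cases hM : PySem.List.max? (a :: t) (fun x => x) with
        | none => exact absurd (PySem.List.max?_eq_none_iff _ _ |>.1 hM) (by simp)
        | some w =>
          rw [hAE v (PySem.List.min?_mem hm) w (PySem.List.max?_mem hM)]

theorem pvGetD_take (p : List Int) (t i : Nat) (h : i < t) :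
    (p.take t).getD i 0 = p.getD i 0 := by
  rw [List.getD_eq_getElem?_getD, List.getElem?_take_of_lt h, List.getD_eq_getElem?_getD]

theorem pvMem_iff (n m : Nat) (outer p : List Int)
    (hp : p.length = n) (hnm : n ≤ m) (x : Int) :
    x ∈ pvSumsOf (pvFinish n m outer p) ↔ x ∈ pvQsums n m outer p := by
  rw [pvFinish_eq]
  unfold pvSumsOf pvQsums
  simp only [List.mem_map, List.mem_filter, List.mem_flatMap, List.mem_range]
  constructor
  · rintro ⟨line, ⟨⟨j, hj, rfl⟩, htr⟩, hsum⟩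
    simp only [pvRow, List.all_cons, List.all_nil, Bool.and_true, Bool.and_eq_true,
      bne_iff_ne, ne_eq, Option.getD_some, List.map_cons, List.map_nil, List.sum_cons,
      List.sum_nil, add_zero] at htr hsum
    obtain ⟨h1, h2, h3⟩ := htr
    by_cases hb : j < n
    · by_cases hc1 : j + 2 ≤ n
      · simp only [if_pos hb, Option.getD_some] at h2
        simp only [if_pos hc1, Option.getD_some] at h3
        simp only [if_pos hb, if_pos hc1, Option.getD_some] at hsum
        refine ⟨j + 1, by omega, ?_⟩
        unfold pvStepQ pvQual
        have hlen : (p.take (j + 1 + 1)).length = j + 2 := by rw [List.length_take]; omega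
        rw [hlen]
        refine List.mem_append_left _ ?_
        rw [if_pos (by omega)]
        have e1 : j + 2 - 2 = j := by omega
        have e2 : j + 2 - 1 = j + 1 := by omega
        rw [e1, e2, pvGetD_take p _ j (by omega), pvGetD_take p _ (j + 1) (by omega)]
        rw [if_pos ⟨h1, h2, h3⟩]
        simp only [List.mem_singleton]
        omega
      · by_cases hc2 : j = m - 1 ∧ 1 ≤ n
        · simp only [if_pos hb, Option.getD_some] at h2
          simp only [if_neg hc1, if_pos hc2, Option.getD_some] at h3
          simp only [if_pos hb, if_neg hc1, if_pos hc2, Option.getD_some] at hsum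
          have hnm' : n = m := by omega
          have hj' : j = n - 1 := by omega
          refine ⟨n - 1, by omega, ?_⟩
          unfold pvStepQ pvQual
          have hlen : (p.take (n - 1 + 1)).length = n := by rw [List.length_take]; omega
          rw [hlen]
          refine List.mem_append_right _ ?_
          rw [if_pos ⟨rfl, hnm'⟩]
          rw [pvGetD_take p _ (m - 1) (by omega), pvGetD_take p _ 0 (by omega),
              show m - 1 = j by omega]
          rw [if_pos ⟨h1, h2, h3⟩]
          simp only [List.mem_singleton]
          omega
        · rw [if_neg hc1, if_neg hc2] at h3
          simp at h3
    · rw [if_neg hb] at h2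
      simp at h2
  · rintro ⟨k, hk, hmem⟩
    unfold pvStepQ pvQual at hmem
    have hlen : (p.take (k + 1)).length = k + 1 := by rw [List.length_take]; omega
    rw [hlen] at hmem
    rcases List.mem_append.1 hmem with h | h
    · by_cases hc : 2 ≤ k + 1
      · rw [if_pos hc] at h
        have e1 : k + 1 - 2 = k - 1 := by omega
        have e2 : k + 1 - 1 = k := by omega
        rw [e1, e2, pvGetD_take p _ (k - 1) (by omega), pvGetD_take p _ k (by omega)] at h
        by_cases hq : outer.getD (k - 1) 0 ≠ 0 ∧ p.getD (k - 1) 0 ≠ 0 ∧ p.getD k 0 ≠ 0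
        · rw [if_pos hq] at h
          simp only [List.mem_singleton] at h
          refine ⟨pvRow n m outer p (k - 1), ⟨⟨k - 1, by omega, rfl⟩, ?_⟩, ?_⟩
          · simp only [pvRow, List.all_cons, List.all_nil, Bool.and_true, Bool.and_eq_true,
              bne_iff_ne, ne_eq, Option.getD_some]
            rw [if_pos (by omega : k - 1 < n), if_pos (by omega : k - 1 + 2 ≤ n)]
            rw [show k - 1 + 1 = k by omega]
            exact ⟨hq.1, by simpa using hq.2.1, by simpa using hq.2.2⟩
          · simp only [pvRow, List.map_cons, List.map_nil, List.sum_cons, List.sum_nil,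
              add_zero, Option.getD_some]
            rw [if_pos (by omega : k - 1 < n), if_pos (by omega : k - 1 + 2 ≤ n)]
            rw [show k - 1 + 1 = k by omega]
            simp only [Option.getD_some]
            omega
        · rw [if_neg hq] at h
          cases h
      · rw [if_neg hc] at h
        cases h
    · by_cases hc : k + 1 = n ∧ n = m
      · rw [if_pos hc] at h
        rw [pvGetD_take p _ (m - 1) (by omega), pvGetD_take p _ 0 (by omega)] at h
        by_cases hq : outer.getD (m - 1) 0 ≠ 0 ∧ p.getD (m - 1) 0 ≠ 0 ∧ p.getD 0 0 ≠ 0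
        · rw [if_pos hq] at h
          simp only [List.mem_singleton] at h
          refine ⟨pvRow n m outer p (m - 1), ⟨⟨m - 1, by omega, rfl⟩, ?_⟩, ?_⟩
          · simp only [pvRow, List.all_cons, List.all_nil, Bool.and_true, Bool.and_eq_true,
              bne_iff_ne, ne_eq, Option.getD_some]
            rw [if_pos (by omega : m - 1 < n),
                if_neg (by omega : ¬ m - 1 + 2 ≤ n), if_pos (⟨trivial, by omega⟩ : True ∧ 1 ≤ n)]
            exact ⟨hq.1, by simpa using hq.2.1, by simpa using hq.2.2⟩
          · simp only [pvRow, List.map_cons, List.map_nil, List.sum_cons, List.sum_nil,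
              add_zero, Option.getD_some]
            rw [if_pos (by omega : m - 1 < n),
                if_neg (by omega : ¬ m - 1 + 2 ≤ n), if_pos (⟨trivial, by omega⟩ : True ∧ 1 ≤ n)]
            simp only [Option.getD_some]
            omega
        · rw [if_neg hq] at h
          cases h
      · rw [if_neg hc] at h
        cases h

theorem pvCheck_iff (n m : Nat) (outer p : List Int)
    (hp : p.length = n) (hnm : n ≤ m) (hout : outer.length = m) :
    pvCheckNgon (pvFinish n m outer p) = true ↔ pvAE (pvQsums n m outer p) := by
  rw [pvCheckNgon]
  rw [pvMinMax_iff]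
  constructor
  · intro h x hx y hy
    exact h x ((pvMem_iff n m outer p hp hnm x).2 hx) y ((pvMem_iff n m outer p hp hnm y).2 hy)
  · intro h x hx y hy
    exact h x ((pvMem_iff n m outer p hp hnm x).1 hx) y ((pvMem_iff n m outer p hp hnm y).1 hy)

theorem pvPerms_zero {α : Type} (xs : List α) : PySem.List.permutations xs 0 = [[]] := by
  rw [PySem.List.permutations]

theorem pvPerms_succ (xs : List Int) (r : Nat) :
    PySem.List.permutations xs (r + 1) =
      (List.range' 0 xs.length).flatMap (fun i =>
        if h : i < xs.length then
          (PySem.List.permutations (xs.eraseIdx i) r).map (fun q => xs[i] :: q)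
        else []) := by
  rw [PySem.List.permutations, List.range_eq_range']
  refine List.flatMap_congr (fun i hi => ?_)
  have hi' : i < xs.length := by
    simp only [List.mem_range'_1] at hi
    omega
  rw [dif_pos hi', List.getElem?_eq_getElem hi']

theorem pvFirstA_append (outer : List Int) (l1 l2 : List (List Int)) :
    pvFirstA outer (l1 ++ l2) = (pvFirstA outer l1).or (pvFirstA outer l2) := by
  induction l1 with
  | nil => simp [pvFirstA]
  | cons pp l1 ih =>
    rw [List.cons_append, pvFirstA, pvFirstA]
    by_cases hc : pvCheckNgon (pvNgonOf outer pp) = true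
    · simp [hc]
    · simp only [Bool.not_eq_true] at hc
      simp [hc, ih]

theorem pvFirstA_none (outer : List Int) (l : List (List Int))
    (h : ∀ pp ∈ l, pvCheckNgon (pvNgonOf outer pp) = false) : pvFirstA outer l = none := by
  induction l with
  | nil => rfl
  | cons pp l ih =>
    rw [pvFirstA, if_neg (by simp [h pp (by simp)])]
    exact ih (fun q hq => h q (by simp [hq]))

theorem pvDfs_eq (n m : Nat) (outer : List Int) (hnm : n ≤ m) (hout : outer.length = m) :
    ∀ (fuel : Nat) (pref rem sums : List Int), rem.length = fuel →
      pref.length + rem.length = n → sums = pvQsums n m outer pref → pvAE sums →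
      pvDfs n m outer fuel pref rem sums =
        pvFirstA outer ((PySem.List.permutations rem rem.length).map (pref ++ ·)) := by
  intro fuel
  induction fuel using Nat.strong_induction_on with
  | _ fuel IH =>
  intro pref rem sums hfuel hn hsums hAE
  by_cases hempty : rem = []
  · subst hempty
    have hf0 : fuel = 0 := by simpa using hfuel.symm
    subst hf0
    have hplen : pref.length = n := by simpa using hn
    have hb : pvNgonOf outer pref = pvFinish n m outer pref := by
      have h0 := pvBuild outer pref (by omega)
      rwa [hplen, hout] at h0
    have hcheck : pvCheckNgon (pvNgonOf outer pref) = true := by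
      rw [hb]
      exact (pvCheck_iff n m outer pref hplen hnm hout).2 (hsums ▸ hAE)
    rw [show ([] : List Int).length = 0 from rfl, pvPerms_zero]
    rw [show ([[]] : List (List Int)).map (pref ++ ·) = [pref] by simp]
    rw [pvDfs, if_pos (show ([] : List Int).isEmpty = true from rfl), pvFirstA, if_pos hcheck, hb]
  · have hlen1 : 1 ≤ rem.length := List.length_pos_iff.2 hempty
    obtain ⟨f', rfl⟩ : ∃ f', fuel = f' + 1 := ⟨fuel - 1, by omega⟩
    have hstep : pvDfs n m outer (f' + 1) pref rem sums = pvDfsLoop n m outer f' pref rem sums 0 := by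
      rw [pvDfs, if_neg (by simp [hempty])]
    have loop : ∀ (d j : Nat), j + d = rem.length →
        pvDfsLoop n m outer f' pref rem sums j =
          pvFirstA outer ((List.range' j d).flatMap (fun i =>
            if h : i < rem.length then
              (PySem.List.permutations (rem.eraseIdx i) f').map (fun q => pref ++ rem[i] :: q)
            else [])) := by
      intro d
      induction d with
      | zero =>
        intro j hj
        rw [pvDfsLoop, dif_neg (by omega)]
        rfl
      | succ d ihd =>
        intro j hj
        have hjlen : j < rem.length := by omega
        rw [pvDfsLoop, dif_pos hjlen, List.range'_succ, List.flatMap_cons, pvFirstA_append,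
          dif_pos hjlen]
        have hslice : PySem.List.slice rem none (some (j : Int)) ++
            PySem.List.slice rem (some ((j : Int) + 1)) none = rem.eraseIdx j := by
          rw [PySem.List.slice_to_natCast, show ((j : Nat) : Int) + 1 = ((j + 1 : Nat) : Int) by omega,
            PySem.List.slice_from_natCast]
          exact (List.eraseIdx_eq_take_drop_succ rem j).symm
        rw [hslice]
        have hrest_len : (rem.eraseIdx j).length = f' := by
          rw [List.length_eraseIdx]
          simp [hjlen]
          omega
        by_cases hAE2 : pvAE (sums ++ pvStepQ n m outer (pref ++ [rem[j]]))
        · rw [pvNewSums_some n m outer (pref ++ [rem[j]]) sums (by simp) (hsums ▸ hAE) hAE2]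
          have hrec := IH f' (by omega) (pref ++ [rem[j]]) (rem.eraseIdx j)
            (sums ++ pvStepQ n m outer (pref ++ [rem[j]])) hrest_len
            (by simp at hn ⊢; omega) (by rw [hsums, ← pvQsums_append]) hAE2
          rw [hrest_len] at hrec
          show (match pvDfs n m outer f' (pref ++ [rem[j]]) (rem.eraseIdx j)
              (sums ++ pvStepQ n m outer (pref ++ [rem[j]])) with
            | some r => some r
            | none => pvDfsLoop n m outer f' pref rem sums (j + 1)) = _
          rw [hrec]
          have hmapeq : (PySem.List.permutations (rem.eraseIdx j) f').map ((pref ++ [rem[j]]) ++ ·) =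
              (PySem.List.permutations (rem.eraseIdx j) f').map (fun q => pref ++ rem[j] :: q) :=
            List.map_congr_left (fun q _ => by simp)
          rw [hmapeq]
          cases hres : pvFirstA outer
              ((PySem.List.permutations (rem.eraseIdx j) f').map (fun q => pref ++ rem[j] :: q)) with
          | some r => rfl
          | none =>
            rw [Option.none_or]
            exact ihd (j + 1) (by omega)
        · rw [pvNewSums_none n m outer (pref ++ [rem[j]]) sums (by simp) (hsums ▸ hAE) hAE2]
          show pvDfsLoop n m outer f' pref rem sums (j + 1) = _
          have hnAE : ¬ pvAE (pvQsums n m outer (pref ++ [rem[j]])) := by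
            rwa [pvQsums_append, ← hsums]
          have hnone : pvFirstA outer
              ((PySem.List.permutations (rem.eraseIdx j) f').map (fun q => pref ++ rem[j] :: q)) = none := by
            refine pvFirstA_none _ _ (fun pp hpp => ?_)
            obtain ⟨q, hq, rfl⟩ := List.mem_map.1 hpp
            have hqlen : q.length = f' := by
              have hperm := PySem.List.perm_of_mem_permutations (by rwa [← hrest_len] at hq)
              rw [hperm.length_eq, hrest_len]
            have hpplen : (pref ++ rem[j] :: q).length = n := by
              simp at hn ⊢
              omega
            have hb := pvBuild outer (pref ++ rem[j] :: q) (by rw [hpplen, hout]; exact hnm)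
            rw [hpplen, hout] at hb
            have hnAE2 : ¬ pvAE (pvQsums n m outer (pref ++ rem[j] :: q)) := by
              rw [show pref ++ rem[j] :: q = (pref ++ [rem[j]]) ++ q by simp]
              exact pvQsums_extend_not n m outer _ q hnAE
            rw [hb]
            cases hcv : pvCheckNgon (pvFinish n m outer (pref ++ rem[j] :: q)) with
            | false => rfl
            | true =>
              exact absurd ((pvCheck_iff n m outer (pref ++ rem[j] :: q) hpplen hnm hout).1 hcv) hnAE2
          rw [hnone, Option.none_or]
          exact ihd (j + 1) (by omega)
    have hR : (PySem.List.permutations rem rem.length).map (pref ++ ·) =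
        (List.range' 0 rem.length).flatMap (fun i =>
          if h : i < rem.length then
            (PySem.List.permutations (rem.eraseIdx i) f').map (fun q => pref ++ rem[i] :: q)
          else []) := by
      conv_lhs => rw [show rem.length = f' + 1 from hfuel]
      rw [pvPerms_succ, List.map_flatMap]
      refine List.flatMap_congr (fun i hi => ?_)
      have hi' : i < rem.length := by
        simp only [List.mem_range'_1] at hi
        omega
      rw [dif_pos hi', dif_pos hi', List.map_map]
      rfl
    rw [hstep, hR, loop rem.length 0 (by omega)]

-- ===== VERDICT (by name: the statement is the Claim_ definition above) =====
theorem build_ngon_spec : Claim_equal_build_ngon := by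
  intro inner outer _ hpre
  unfold Spec_build_ngon build_ngon build_ngon_alt
  have h := pvDfs_eq inner.length outer.length outer hpre rfl inner.length [] inner [] rfl
    (by simp) (by simp [pvQsums]) (by intro x hx; simp at hx)
  rw [h]
  simp
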